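-- pv_equiv track=rewrite | github.com/lawkelvin33/swmaestro_ct | 42840_bf.py | solution
-- ===== SOURCE A (Python) =====
-- def solution(answers):
--     answer = []
--     scores = [0,0,0]
--     supo = [[1,2,3,4,5],
--             [2,1,2,3,2,4,2,5],
--             [3,3,1,1,2,2,4,4,5,5]
--            ]
--
--     for i in range(len(answers)):
--         scores[0] += int(supo[0][i%5] == answers[i])
--         scores[1] += int(supo[1][i%8] == answers[i])
--         scores[2] += int(supo[2][i%10] == answers[i])
--
--     for i in range(3):
--         if scores[i] == max(scores):
--             answer.append(i+1)
--     answer.sort()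
--
--     return answer
-- ===== SOURCE B (Python) =====
-- def solution(answers):
--     supo = [[1, 2, 3, 4, 5],
--             [2, 1, 2, 3, 2, 4, 2, 5],
--             [3, 3, 1, 1, 2, 2, 4, 4, 5, 5]]
--     # One pass: frequency table of (position mod 40, value); 40 = lcm(5, 8, 10),
--     # so each pattern's prediction at position i depends only on i % 40.
--     cnt = {}
--     for i, a in enumerate(answers):
--         k = (i % 40, a)
--         cnt[k] = cnt.get(k, 0) + 1
--     scores = [sum(cnt.get((r, pat[r % len(pat)]), 0) for r in range(40)) for pat in supo]
--     m = max(scores)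
--     return [j + 1 for j, s in enumerate(scores) if s == m]
-- ===== Notes on version B (the rewrite author's own statement) =====
-- stated objective: alternative
-- what changed: Instead of comparing every answer against all three patterns element by element (A's fused loop with i%5/i%8/i%10 indexing), B builds in one pass a frequency table keyed by (position mod 40, value) - 40 being the lcm of the pattern periods - and then scores each pattern by just 40 table lookups; the max/filter stage replaces A's index loop plus sort.
import Mathlib
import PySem

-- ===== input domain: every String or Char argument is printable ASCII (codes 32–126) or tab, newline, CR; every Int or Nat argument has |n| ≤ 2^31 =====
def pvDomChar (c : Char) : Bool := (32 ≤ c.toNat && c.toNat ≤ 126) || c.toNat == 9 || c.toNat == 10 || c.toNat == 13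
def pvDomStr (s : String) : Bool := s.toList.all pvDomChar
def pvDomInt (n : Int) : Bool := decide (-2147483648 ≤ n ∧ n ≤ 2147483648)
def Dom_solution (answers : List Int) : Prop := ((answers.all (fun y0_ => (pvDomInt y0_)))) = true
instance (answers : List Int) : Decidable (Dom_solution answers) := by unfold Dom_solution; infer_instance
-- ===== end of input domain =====

-- B replaces A's per-element pattern comparisons by a frequency table keyed by (i % 40, value)
-- built in one pass (40 = lcm of the pattern periods 5, 8, 10); each pattern is then scored by
-- 40 table lookups (alternative decomposition, no speed claim).

-- ===== PORT A =====
-- All list indexings in A are always in range (i < len answers, i%L < L), so pyGetD is exact here.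
def solution (answers : List Int) : List Int :=
  let supo : List (List Int) := [[1,2,3,4,5],[2,1,2,3,2,4,2,5],[3,3,1,1,2,2,4,4,5,5]]
  let scores : Int × Int × Int :=
    (PySem.List.pyRange 0 (answers.length : Int) 1).foldl
      (fun s i =>
        (s.1 + (if PySem.List.pyGetD (PySem.List.pyGetD supo 0 []) (PySem.Int.mod i 5) 0 = PySem.List.pyGetD answers i 0 then 1 else 0),
         s.2.1 + (if PySem.List.pyGetD (PySem.List.pyGetD supo 1 []) (PySem.Int.mod i 8) 0 = PySem.List.pyGetD answers i 0 then 1 else 0),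
         s.2.2 + (if PySem.List.pyGetD (PySem.List.pyGetD supo 2 []) (PySem.Int.mod i 10) 0 = PySem.List.pyGetD answers i 0 then 1 else 0)))
      (0, 0, 0)
  let sl : List Int := [scores.1, scores.2.1, scores.2.2]
  let answer : List Int :=
    (PySem.List.pyRange 0 3 1).foldl
      (fun acc i => if PySem.List.pyGetD sl i 0 = (PySem.List.max? sl (fun x => x)).getD 0 then acc ++ [i + 1] else acc)
      []
  PySem.List.sorted answer (fun x => x) false

-- ===== PORT B =====
def solution_alt (answers : List Int) : List Int :=
  let supo : List (List Int) := [[1,2,3,4,5],[2,1,2,3,2,4,2,5],[3,3,1,1,2,2,4,4,5,5]]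
  let cnt : PySem.Dict (Int × Int) Int :=
    (PySem.List.enumerate answers 0).foldl
      (fun d p => d.insert (PySem.Int.mod p.1 40, p.2) (d.getD (PySem.Int.mod p.1 40, p.2) 0 + 1))
      PySem.Dict.empty
  let scores : List Int := supo.map (fun pat =>
    ((PySem.List.pyRange 0 40 1).map
      (fun r => cnt.getD (r, PySem.List.pyGetD pat (PySem.Int.mod r (pat.length : Int)) 0) 0)).sum)
  let m : Int := (PySem.List.max? scores (fun x => x)).getD 0
  ((PySem.List.enumerate scores 0).filter (fun p => p.2 = m)).map (fun p => p.1 + 1)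

-- ===== PRECONDITION & SPEC =====
def Spec_solution (answers : List Int) (out : List Int) : Prop := out = solution_alt answers
instance (answers : List Int) (out : List Int) : Decidable (Spec_solution answers out) := by unfold Spec_solution; infer_instance

-- ===== CLAIM =====
def Claim_equal_solution : Prop := ∀ (answers : List Int), Dom_solution answers → Spec_solution answers (solution answers)

-- ===== LEMMAS AND PROOFS =====

-- an indicator summed over a duplicate-free list fires at most once
lemma sum_ite_pair (t : Int → Int) (e : Int × Int) :
    ∀ (rs : List Int), rs.Nodup →
    (rs.map (fun r => if (r, t r) = e then (1 : Int) else 0)).sum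
      = if e.1 ∈ rs ∧ t e.1 = e.2 then 1 else 0 := by
  intro rs
  induction rs with
  | nil => intro _; simp
  | cons r rs ih =>
    intro hnd
    rw [List.nodup_cons] at hnd
    rw [List.map_cons, List.sum_cons, ih hnd.2]
    by_cases hr : r = e.1
    · subst hr
      have h1 : ((e.1, t e.1) = e) ↔ (t e.1 = e.2) :=
        ⟨fun h => congrArg Prod.snd h, fun h => Prod.ext rfl h⟩
      by_cases hc : t e.1 = e.2 <;> simp [h1, hc, hnd.1, List.mem_cons]
    · have h1 : ((r, t r) = e) ↔ False :=
        iff_false_intro (fun h => hr (congrArg Prod.fst h))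
      simp [h1, List.mem_cons, Ne.symm hr]

-- summing per-residue counts over all residues counts each pair once
lemma sum_count_eq (t : Int → Int) (rs : List Int) (hnd : rs.Nodup) :
    ∀ (l : List (Int × Int)), (∀ e ∈ l, e.1 ∈ rs) →
    (rs.map (fun r => (l.count (r, t r) : Int))).sum
      = (l.map (fun e => if t e.1 = e.2 then (1 : Int) else 0)).sum := by
  intro l
  induction l with
  | nil => intro _; simp
  | cons e l ih =>
    intro hmem
    have hcnt : ∀ r : Int, ((e :: l).count (r, t r) : Int)
        = (l.count (r, t r) : Int) + (if (r, t r) = e then (1 : Int) else 0) := by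
      intro r
      rw [List.count_cons]
      rcases eq_or_ne (r, t r) e with h | h
      · simp [h]
      · simp [h, Ne.symm h]
    have hsplit :
        (rs.map (fun r => ((e :: l).count (r, t r) : Int))).sum
          = (rs.map (fun r => (l.count (r, t r) : Int))).sum
            + (rs.map (fun r => if (r, t r) = e then (1 : Int) else 0)).sum := by
      rw [← List.sum_map_add]
      exact congrArg _ (List.map_congr_left (fun r _ => hcnt r))
    rw [hsplit, ih (fun x hx => hmem x (List.mem_cons_of_mem e hx)),
        sum_ite_pair t e rs hnd, List.map_cons, List.sum_cons]
    have he : e.1 ∈ rs := hmem e (List.mem_cons_self)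
    simp only [he, true_and]
    ring

-- per-pattern equality: B's 40 table lookups = A's per-element comparison sum
lemma score_eq (pat : List Int) (L : Int)
    (hpos : 0 < L) (hdvd : L ∣ 40) (answers : List Int) :
    ((PySem.List.pyRange 0 40 1).map
      (fun r => ((((PySem.List.enumerate answers 0).map
          (fun p => (PySem.Int.mod p.1 40, p.2))).count
            (r, PySem.List.pyGetD pat (PySem.Int.mod r L) 0) : Nat) : Int))).sum
    = ((PySem.List.enumerate answers 0).map
        (fun q => if PySem.List.pyGetD pat (PySem.Int.mod q.1 L) 0 = q.2 then (1 : Int) else 0)).sum := by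
  set t : Int → Int := fun x => PySem.List.pyGetD pat (PySem.Int.mod x L) 0 with ht
  set keyed : List (Int × Int) :=
    (PySem.List.enumerate answers 0).map (fun p => (PySem.Int.mod p.1 40, p.2)) with hk
  have h40 : (0 : Int) < 40 := by norm_num
  have hmem : ∀ e ∈ keyed, e.1 ∈ PySem.List.pyRange 0 40 1 := by
    intro e he
    rw [hk, List.mem_map] at he
    obtain ⟨p, _, rfl⟩ := he
    rw [PySem.List.mem_pyRange_one]
    have := PySem.Int.mod_eq_emod_of_pos (a := p.1) h40
    constructor
    · simp only [this]; exact Int.emod_nonneg _ (by norm_num)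
    · simp only [this]; exact Int.emod_lt_of_pos _ h40
  rw [sum_count_eq t (PySem.List.pyRange 0 40 1) (PySem.List.nodup_pyRange_one 0 40) keyed hmem]
  rw [hk, List.map_map]
  refine congrArg List.sum (List.map_congr_left ?_)
  intro q _
  simp only [Function.comp]
  have hmm : t (PySem.Int.mod q.1 40) = t q.1 := by
    rw [ht]
    simp only
    congr 1
    rw [PySem.Int.mod_eq_emod_of_pos (a := q.1) h40,
        PySem.Int.mod_eq_emod_of_pos (a := q.1 % 40) hpos,
        PySem.Int.mod_eq_emod_of_pos (a := q.1) hpos]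
    exact Int.emod_emod_of_dvd q.1 hdvd
  rw [hmm]

-- a counting loop keyed through a function, unfolded to a count on the mapped list
lemma getD_keyfold {α : Type} (key : α → Int × Int) :
    ∀ (l : List α) (d : PySem.Dict (Int × Int) Int) (v : Int × Int),
    (l.foldl (fun d x => d.insert (key x) (d.getD (key x) 0 + 1)) d).getD v 0
      = d.getD v 0 + ((l.map key).count v : Int) := by
  intro l
  induction l with
  | nil => intro d v; simp
  | cons x l ih =>
    intro d v
    rw [List.foldl_cons, ih, List.map_cons, List.count_cons, PySem.Dict.getD_insert]
    by_cases h : v = key x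
    · subst h
      simp only [BEq.rfl]
      push_cast
      ring
    · have h' : ¬ key x = v := fun hh => h hh.symm
      simp [h, h']

-- the componentwise triple fold is a triple of 0/1 sums
lemma foldl_triple (F G H : Int → Int) (l : List Int) :
    ∀ (s : Int × Int × Int),
    l.foldl (fun s i => (s.1 + F i, s.2.1 + G i, s.2.2 + H i)) s
    = (s.1 + (l.map F).sum, s.2.1 + (l.map G).sum, s.2.2 + (l.map H).sum) := by
  induction l with
  | nil => intro s; simp
  | cons x t ih =>
    intro s
    simp only [List.foldl_cons, ih, List.map_cons, List.sum_cons]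
    refine congrArg₂ _ (by ring) (congrArg₂ _ (by ring) (by ring))

-- A's pyRange-indexed 0/1 sum in enumerate form
lemma sumA_enum (pat : List Int) (L : Int) (answers : List Int) :
    ((PySem.List.pyRange 0 (answers.length : Int) 1).map
      (fun i => if PySem.List.pyGetD pat (PySem.Int.mod i L) 0 = PySem.List.pyGetD answers i 0 then (1 : Int) else 0)).sum
    = ((PySem.List.enumerate answers 0).map
        (fun q => if PySem.List.pyGetD pat (PySem.Int.mod q.1 L) 0 = q.2 then (1 : Int) else 0)).sum := by
  have he := PySem.List.enumerate_eq_map_pyRange answers (0 : Int)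
  rw [PySem.List.len_eq] at he
  rw [he, List.map_map]
  rfl

-- the common final stage on three scores
lemma final_eq (a b c : Int) :
    PySem.List.sorted
      ((PySem.List.pyRange 0 3 1).foldl
        (fun acc i => if PySem.List.pyGetD [a,b,c] i 0 = (PySem.List.max? [a,b,c] (fun x => x)).getD 0
                      then acc ++ [i + 1] else acc) [])
      (fun x => x) false
    = ((PySem.List.enumerate [a,b,c] 0).filter
        (fun p => p.2 = (PySem.List.max? [a,b,c] (fun x => x)).getD 0)).map (fun p => p.1 + 1) := by
  have h3 : PySem.List.pyRange 0 3 1 = [0, 1, 2] := by decide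
  rw [h3]
  set m : Int := (PySem.List.max? [a,b,c] (fun x => x)).getD 0 with hm
  by_cases ha : a = m <;> by_cases hb : b = m <;> by_cases hc : c = m <;>
    simp [PySem.List.enumerate, PySem.List.pyGetD, ha, hb, hc] <;> decide

-- ===== VERDICT =====
theorem solution_spec : Claim_equal_solution := by
  intro answers _
  unfold Spec_solution solution solution_alt
  simp only [List.map_cons, List.map_nil]
  have hs0 : PySem.List.pyGetD ([[1,2,3,4,5],[2,1,2,3,2,4,2,5],[3,3,1,1,2,2,4,4,5,5]] : List (List Int)) 0 [] = [1,2,3,4,5] := by decide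
  have hs1 : PySem.List.pyGetD ([[1,2,3,4,5],[2,1,2,3,2,4,2,5],[3,3,1,1,2,2,4,4,5,5]] : List (List Int)) 1 [] = [2,1,2,3,2,4,2,5] := by decide
  have hs2 : PySem.List.pyGetD ([[1,2,3,4,5],[2,1,2,3,2,4,2,5],[3,3,1,1,2,2,4,4,5,5]] : List (List Int)) 2 [] = [3,3,1,1,2,2,4,4,5,5] := by decide
  rw [hs0, hs1, hs2, foldl_triple]
  simp only [zero_add]
  have hcnt : ∀ k : Int × Int,
      ((PySem.List.enumerate answers 0).foldl
        (fun d p => d.insert (PySem.Int.mod p.1 40, p.2) (d.getD (PySem.Int.mod p.1 40, p.2) 0 + 1))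
        PySem.Dict.empty).getD k 0
      = (((PySem.List.enumerate answers 0).map (fun p => (PySem.Int.mod p.1 40, p.2))).count k : Int) := by
    intro k
    rw [getD_keyfold (fun p : Int × Int => (PySem.Int.mod p.1 40, p.2)), PySem.Dict.getD_empty]
    simp
  simp only [hcnt]
  have hl5 : (([1,2,3,4,5] : List Int).length : Int) = 5 := by norm_num
  have hl8 : (([2,1,2,3,2,4,2,5] : List Int).length : Int) = 8 := by norm_num
  have hl10 : (([3,3,1,1,2,2,4,4,5,5] : List Int).length : Int) = 10 := by norm_num
  simp only [hl5, hl8, hl10]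
  rw [score_eq [1,2,3,4,5] 5 (by decide) (by decide) answers,
      score_eq [2,1,2,3,2,4,2,5] 8 (by decide) (by decide) answers,
      score_eq [3,3,1,1,2,2,4,4,5,5] 10 (by decide) (by decide) answers,
      ← sumA_enum [1,2,3,4,5] 5 answers,
      ← sumA_enum [2,1,2,3,2,4,2,5] 8 answers,
      ← sumA_enum [3,3,1,1,2,2,4,4,5,5] 10 answers]
  exact final_eq _ _ _
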